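-- pv_equiv track=rewrite | github.com/anshika52004/Innomatics | Programming_task-2/1512._Number_of_Good_Pairs.py | numIndenticalPairs
-- ===== SOURCE A (Python) =====
-- def numIndenticalPairs(nums):
--     ans=0
--     l = len(nums)
--     for i in range(l):
--         for j in range(i+1,l):
--             if nums[i] == nums[j]:
--                 ans+=1
--
--     return ans
-- ===== SOURCE B (Python) =====
-- def numIndenticalPairs(nums):
--     # One pass: for each element add the number of equal elements already seen.
--     ans = 0
--     seen = {}
--     for x in nums:
--         c = seen.get(x, 0)
--         ans += c
--         seen[x] = c + 1
--     return ans
-- ===== Notes on version B (the rewrite author's own statement) =====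
-- stated objective: faster
-- what changed: Replaces the O(n^2) nested index loops with a single pass that keeps a dict of counts of elements seen so far and adds that count for each element.
import Mathlib
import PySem

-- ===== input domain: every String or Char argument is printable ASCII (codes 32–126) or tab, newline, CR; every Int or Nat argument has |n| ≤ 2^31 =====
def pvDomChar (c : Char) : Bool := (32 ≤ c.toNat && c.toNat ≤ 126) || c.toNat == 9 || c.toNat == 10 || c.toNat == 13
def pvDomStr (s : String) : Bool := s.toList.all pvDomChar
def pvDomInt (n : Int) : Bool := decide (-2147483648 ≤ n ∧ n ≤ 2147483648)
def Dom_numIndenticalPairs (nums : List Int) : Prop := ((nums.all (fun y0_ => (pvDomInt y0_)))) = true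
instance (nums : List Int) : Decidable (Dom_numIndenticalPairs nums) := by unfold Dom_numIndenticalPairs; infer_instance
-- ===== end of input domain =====

-- B replaces A's nested index loops with one pass keeping a dict of counts of the elements seen so far.

-- ===== PORT A =====
def numIndenticalPairs (nums : List Int) : Int :=
  let l : Int := nums.length
  (PySem.List.pyRange 0 l 1).foldl (fun ans i =>
    (PySem.List.pyRange (i + 1) l 1).foldl (fun ans j =>
      if PySem.List.pyGetD nums i 0 = PySem.List.pyGetD nums j 0 then ans + 1 else ans) ans) 0

-- ===== PORT B =====
def numIndenticalPairs_alt (nums : List Int) : Int :=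
  (nums.foldl (fun (st : Int × PySem.Dict Int Int) x =>
    let c := st.2.getD x 0
    (st.1 + c, st.2.insert x (c + 1))) (0, PySem.Dict.empty)).1

-- ===== PRECONDITION & SPEC =====
def Spec_numIndenticalPairs (nums : List Int) (out : Int) : Prop := out = numIndenticalPairs_alt nums
instance (nums : List Int) (out : Int) : Decidable (Spec_numIndenticalPairs nums out) := by unfold Spec_numIndenticalPairs; infer_instance

-- ===== CLAIM (what is proved, stated in full; the proofs are below) =====
def Claim_equal_numIndenticalPairs : Prop := ∀ (nums : List Int), Dom_numIndenticalPairs nums → Spec_numIndenticalPairs nums (numIndenticalPairs nums)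

-- ===== LEMMAS AND PROOFS =====

-- canonical pair count: pc (x :: xs) = (#elements of xs equal to x) + pc xs
def pc : List Int → Int
  | [] => 0
  | x :: xs => (xs.count x : Int) + pc xs

theorem countP_eq_count (c : Int) (l : List Int) :
    List.countP (fun v => decide (c = v)) l = l.count c := by
  rw [List.count]
  apply List.countP_congr
  intro x _
  simp only [decide_eq_true_eq, beq_iff_eq]
  exact eq_comm

-- A's inner loop counts the later occurrences of nums[i]
theorem inner_eq (nums : List Int) (i : Int) (h0 : 0 ≤ i) (ans : Int) :
    (PySem.List.pyRange (i+1) ((nums.length : Int)) 1).foldl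
      (fun ans j => if PySem.List.pyGetD nums i 0 = PySem.List.pyGetD nums j 0 then ans + 1 else ans) ans
    = ans + ((nums.drop (i+1).toNat).count (PySem.List.pyGetD nums i 0) : Int) := by
  rw [show PySem.List.pyRange (i+1) ((nums.length : Int)) 1
      = PySem.List.pyRange (i+1) ((nums.length : Int)) from rfl]
  rw [PySem.List.foldl_pyRange_pyGetD' nums 0
    (fun acc v => if PySem.List.pyGetD nums i 0 = v then acc + 1 else acc) ans
    (show (0:Int) ≤ i+1 by omega)]
  rw [PySem.List.foldl_ite_add_one]
  rw [countP_eq_count]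

-- summing those counts over a tail range gives pc of the corresponding suffix
theorem sum_range_pc (nums : List Int) : ∀ (k : Nat), k ≤ nums.length →
    ((PySem.List.pyRange (((nums.length - k : Nat) : Int)) (nums.length : Int) 1).map
       (fun i => ((nums.drop (i+1).toNat).count (PySem.List.pyGetD nums i 0) : Int))).sum
    = pc (nums.drop (nums.length - k)) := by
  intro k
  induction k with
  | zero =>
    intro _
    rw [show (((nums.length - 0 : Nat) : Int)) = (nums.length : Int) by simp]
    rw [PySem.List.pyRange_one_eq_nil (le_refl _)]
    simp [pc]
  | succ k ih =>
    intro hk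
    have ha : nums.length - (k+1) < nums.length := by omega
    have hcast : (((nums.length - (k+1) : Nat) : Int)) < (nums.length : Int) := by
      exact_mod_cast ha
    rw [PySem.List.pyRange_one_cons hcast]
    rw [List.map_cons, List.sum_cons]
    have hstep : (((nums.length - (k+1) : Nat) : Int)) + 1 = (((nums.length - k : Nat) : Int)) := by
      omega
    rw [hstep]
    rw [ih (by omega)]
    have hget : PySem.List.pyGetD nums (((nums.length - (k+1) : Nat) : Int)) 0
        = nums[nums.length - (k+1)]'ha := by
      rw [PySem.List.pyGetD_eq_getElem nums 0 (by positivity) (by exact_mod_cast ha)]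
      congr 1
    rw [hget]
    simp only [Int.toNat_natCast]
    have hdrop : nums.drop (nums.length - (k+1))
        = nums[nums.length - (k+1)]'ha :: nums.drop (nums.length - k) := by
      rw [List.drop_eq_getElem_cons ha,
        show nums.length - (k+1) + 1 = nums.length - k from by omega]
    rw [hdrop, pc]

theorem A_eq_pc (nums : List Int) : numIndenticalPairs nums = pc nums := by
  unfold numIndenticalPairs
  rw [PySem.List.foldl_congr_mem _ _
    (fun ans i => ans + ((nums.drop (i+1).toNat).count (PySem.List.pyGetD nums i 0) : Int)) 0
    (by
      intro acc x hx
      have hx' := (PySem.List.mem_pyRange_one).1 hx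
      exact inner_eq nums x hx'.1 acc)]
  rw [PySem.List.foldl_add]
  have := sum_range_pc nums nums.length (le_refl _)
  simp only [Nat.sub_self, Nat.cast_zero, List.drop_zero] at this
  rw [this]
  ring

-- B-side: a step of the fold, and the loop invariant
theorem sum_map_insert (x : Int) (seen : PySem.Dict Int Int) :
    ∀ (xs : List Int),
    (xs.map (fun y => (seen.insert x (seen.getD x 0 + 1)).getD y 0)).sum
    = (xs.map (fun y => seen.getD y 0)).sum + (xs.count x : Int) := by
  intro xs
  induction xs with
  | nil => simp
  | cons z zs ih =>
    simp only [List.map_cons, List.sum_cons, List.count_cons, ih]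
    rw [PySem.Dict.getD_insert]
    by_cases hz : z = x
    · simp [hz]
      ring
    · simp [hz, Ne.symm]
      ring

theorem B_go (xs : List Int) : ∀ (ans : Int) (seen : PySem.Dict Int Int),
    (xs.foldl (fun (st : Int × PySem.Dict Int Int) x =>
      let c := st.2.getD x 0
      (st.1 + c, st.2.insert x (c + 1))) (ans, seen)).1
    = ans + (xs.map (fun y => seen.getD y 0)).sum + pc xs := by
  induction xs with
  | nil => intro ans seen; simp [pc]
  | cons z zs ih =>
    intro ans seen
    simp only [List.foldl_cons]
    rw [ih]
    rw [sum_map_insert]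
    simp only [List.map_cons, List.sum_cons, pc]
    ring

theorem B_eq_pc (nums : List Int) : numIndenticalPairs_alt nums = pc nums := by
  unfold numIndenticalPairs_alt
  rw [B_go]
  simp [PySem.Dict.getD_empty]

-- ===== VERDICT (by name: the statement is the Claim_ definition above) =====
theorem numIndenticalPairs_spec : Claim_equal_numIndenticalPairs := by
  intro nums _
  unfold Spec_numIndenticalPairs
  rw [A_eq_pc, B_eq_pc]
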